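-- pv_equiv track=rewrite | github.com/raeez/chiral-bar-cobar | compute/lib/btz_quantum_gravity_engine.py | farey_sequence
-- ===== SOURCE A (Python) =====
-- import math
-- from typing import Any, Dict, List, Optional, Tuple
--
-- def farey_sequence(N: int) -> List[Tuple[int, int]]:
--     """Coprime pairs (c_F, d) with 0 <= c_F <= N, gcd(c_F, d) = 1.
--
--     These index the SL(2,Z)/Gamma_infty cosets in the Farey tail.
--     """
--     pairs = [(0, 1)]  # Identity: c_F=0, d=1
--     for c_F in range(1, N + 1):
--         for d in range(0, c_F + 1):
--             if math.gcd(c_F, d) == 1: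
--                 pairs.append((c_F, d))
--                 if d > 0 and d < c_F:
--                     pairs.append((c_F, -d))  # negative d images
--     return pairs
-- ===== SOURCE B (Python) =====
-- from typing import List, Tuple
--
-- def farey_sequence(N: int) -> List[Tuple[int, int]]:
--     """Coprime pairs (c_F, d) with 0 <= c_F <= N, gcd(c_F, d) = 1.
--
--     Per denominator c, build once the set of residues sharing a nontrivial
--     divisor with c (no gcd calls), then emit the whole row as one
--     comprehension with a sign factor for the negative images.
--     """
--     result = [(0, 1)]
--     for c in range(1, N + 1):
--         marked = {m for p in range(2, c + 1) if c % p == 0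
--                     for m in range(0, c + 1, p)}
--         result += [(c, s * d)
--                    for d in range(c + 1) if d not in marked
--                    for s in ((1,) if d == 0 or d == c else (1, -1))]
--     return result
-- ===== Notes on version B (the rewrite author's own statement) =====
-- stated objective: alternative
-- what changed: Replaces the per-pair math.gcd test and conditional append loop with a per-denominator divisor sieve (a set comprehension marking residues sharing a nontrivial divisor with c) and a single flat comprehension emitting each row with a sign factor.
import Mathlib
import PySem

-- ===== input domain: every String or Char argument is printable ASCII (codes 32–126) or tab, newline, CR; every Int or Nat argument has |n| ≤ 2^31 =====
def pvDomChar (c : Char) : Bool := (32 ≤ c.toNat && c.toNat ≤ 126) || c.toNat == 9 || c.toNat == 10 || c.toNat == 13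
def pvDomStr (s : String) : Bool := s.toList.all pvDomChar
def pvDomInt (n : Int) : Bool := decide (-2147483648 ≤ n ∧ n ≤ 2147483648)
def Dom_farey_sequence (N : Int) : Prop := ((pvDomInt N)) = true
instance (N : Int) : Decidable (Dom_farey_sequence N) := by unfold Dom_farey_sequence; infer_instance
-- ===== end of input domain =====

-- B replaces the per-pair gcd test and conditional-append loop with a per-denominator
-- divisor sieve and a flat sign-factor comprehension per row; same output, different algorithm.

-- ===== PORT A =====
-- math.gcd(c, d) = Int.gcd c d (gcd of absolute values; both arguments are ≥ 0 here)
def farey_sequence (N : Int) : List (Int × Int) :=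
  (PySem.List.pyRange 1 (N + 1) 1).foldl (fun pairs c_F =>
    (PySem.List.pyRange 0 (c_F + 1) 1).foldl (fun pairs d =>
      if Int.gcd c_F d == 1 then
        let pairs := pairs ++ [(c_F, d)]
        if d > 0 && d < c_F then pairs ++ [(c_F, -d)] else pairs
      else pairs) pairs) [(0, 1)]

-- ===== PORT B =====
-- the set comprehension {m for p in range(2,c+1) if c%p==0 for m in range(0,c+1,p)}
def fsMarked (c : Int) : PySem.Set Int :=
  PySem.Set.ofList
    (((PySem.List.pyRange 2 (c + 1) 1).filter (fun p => PySem.Int.mod c p == 0)).flatMap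
      (fun p => PySem.List.pyRange 0 (c + 1) p))

-- the row comprehension [(c, s*d) for d in range(c+1) if d not in marked for s in …]
def fsRow (c : Int) : List (Int × Int) :=
  let marked := fsMarked c
  ((PySem.List.pyRange 0 (c + 1) 1).filter (fun d => !(PySem.Set.contains marked d))).flatMap
    (fun d => (if d == 0 || d == c then [(1 : Int)] else [1, -1]).map (fun s => (c, s * d)))

def farey_sequence_alt (N : Int) : List (Int × Int) :=
  [(0, 1)] ++ (PySem.List.pyRange 1 (N + 1) 1).flatMap fsRow

-- ===== PRECONDITION & SPEC =====
def Spec_farey_sequence (N : Int) (out : List (Int × Int)) : Prop := out = farey_sequence_alt N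
instance (N : Int) (out : List (Int × Int)) : Decidable (Spec_farey_sequence N out) := by unfold Spec_farey_sequence; infer_instance

-- ===== CLAIM (what is proved, stated in full; the proofs are below) =====
def Claim_equal_farey_sequence : Prop := ∀ (N : Int), Dom_farey_sequence N → Spec_farey_sequence N (farey_sequence N)

-- ===== LEMMAS AND PROOFS =====

-- the piece A's inner loop appends for one d
def pvPiece (c d : Int) : List (Int × Int) :=
  if Int.gcd c d == 1 then (c, d) :: (if d > 0 && d < c then [(c, -d)] else []) else []

lemma pv_filter_flatMap {α β : Type} (p : α → Bool) (f : α → List β) (l : List α) :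
    (l.filter p).flatMap f = l.flatMap (fun x => if p x then f x else []) := by
  induction l with
  | nil => rfl
  | cons a t ih =>
    by_cases h : p a = true <;> simp [h, ih]

lemma pv_flatMap_congr {α β : Type} (f g : α → List β) (l : List α)
    (h : ∀ x ∈ l, f x = g x) : l.flatMap f = l.flatMap g := by
  induction l with
  | nil => rfl
  | cons a t ih =>
    simp only [List.flatMap_cons, h a List.mem_cons_self,
      ih (fun x hx => h x (List.mem_cons_of_mem _ hx))]

-- number theory core: for 1 ≤ c and any d, gcd(c,d) ≠ 1 iff some 2 ≤ p ≤ c divides both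
lemma pv_gcd_ne_one_iff (c d : Int) (hc : 1 ≤ c) :
    ¬(Int.gcd c d = 1) ↔ ∃ p, 2 ≤ p ∧ p < c + 1 ∧ p ∣ c ∧ p ∣ d := by
  constructor
  · intro hne
    refine ⟨(Int.gcd c d : Int), ?_, ?_, Int.gcd_dvd_left c d, Int.gcd_dvd_right c d⟩
    · have hzero : Int.gcd c d ≠ 0 := by
        intro h
        rw [Int.gcd_eq_zero_iff] at h
        omega
      have : 1 ≤ Int.gcd c d := Nat.one_le_iff_ne_zero.mpr hzero
      have : Int.gcd c d ≠ 1 := hne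
      omega
    · have hle : (Int.gcd c d : Int) ≤ c := Int.le_of_dvd (by omega) (Int.gcd_dvd_left c d)
      omega
  · rintro ⟨p, hp2, _, hpc, hpd⟩ hg
    rw [← Int.isCoprime_iff_gcd_eq_one] at hg
    obtain ⟨u, v, huv⟩ := hg
    have hp1 : p ∣ 1 := by
      rw [← huv]
      exact Dvd.dvd.add (Dvd.dvd.mul_left hpc u) (Dvd.dvd.mul_left hpd v)
    have := Int.le_of_dvd one_pos hp1
    omega

-- the sieve set for c contains exactly the d ∈ [0, c] with gcd(c, d) ≠ 1
lemma pv_marked_iff (c d : Int) (hc : 1 ≤ c) (hd0 : 0 ≤ d) (hdc : d < c + 1) :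
    PySem.Set.contains (fsMarked c) d = true ↔ ¬(Int.gcd c d = 1) := by
  unfold fsMarked
  rw [show (PySem.Set.contains (PySem.Set.ofList _) d = true) ↔ d ∈ PySem.Set.ofList
      (((PySem.List.pyRange 2 (c + 1) 1).filter (fun p => PySem.Int.mod c p == 0)).flatMap
        (fun p => PySem.List.pyRange 0 (c + 1) p)) from by simp [PySem.Set.contains]]
  rw [PySem.Set.mem_ofList, List.mem_flatMap, pv_gcd_ne_one_iff c d hc]
  constructor
  · rintro ⟨p, hp, hy⟩
    rw [List.mem_filter, PySem.List.mem_pyRange_one] at hp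
    obtain ⟨⟨hp2, hplt⟩, hmod⟩ := hp
    have hpos : (0 : Int) < p := by omega
    rw [PySem.List.mem_pyRange_iff_of_pos hpos] at hy
    refine ⟨p, hp2, hplt, ?_, ?_⟩
    · rw [← PySem.Int.mod_eq_zero_iff_dvd]
      simpa using hmod
    · simpa using hy.2.2
  · rintro ⟨p, hp2, hplt, hpc, hpd⟩
    refine ⟨p, ?_, ?_⟩
    · rw [List.mem_filter, PySem.List.mem_pyRange_one]
      exact ⟨⟨hp2, hplt⟩, by simp [PySem.Int.mod_eq_zero_iff_dvd, hpc]⟩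
    · rw [PySem.List.mem_pyRange_iff_of_pos (by omega : (0:Int) < p)]
      exact ⟨hd0, hdc, by simpa using hpd⟩

-- A's inner loop is an extend-by-pieces loop
lemma pv_inner_eq (c : Int) (pairs : List (Int × Int)) (l : List Int) :
    l.foldl (fun pairs d =>
      if Int.gcd c d == 1 then
        let pairs := pairs ++ [(c, d)]
        if d > 0 && d < c then pairs ++ [(c, -d)] else pairs
      else pairs) pairs = pairs ++ l.flatMap (pvPiece c) := by
  have hbody : (fun (pairs : List (Int × Int)) d =>
      if Int.gcd c d == 1 then
        let pairs := pairs ++ [(c, d)]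
        if d > 0 && d < c then pairs ++ [(c, -d)] else pairs
      else pairs) = fun pairs d => pairs ++ pvPiece c d := by
    funext pairs d
    unfold pvPiece
    by_cases h : Int.gcd c d = 1 <;> by_cases h2 : (d > 0 && d < c) = true <;>
      simp [h, h2]
  rw [hbody, PySem.List.foldl_append_eq_flatMap]

-- for 1 ≤ c, B's row equals the concatenation of A's pieces
lemma pv_row_eq (c : Int) (hc : 1 ≤ c) :
    fsRow c = (PySem.List.pyRange 0 (c + 1) 1).flatMap (pvPiece c) := by
  unfold fsRow
  rw [pv_filter_flatMap]
  apply pv_flatMap_congr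
  intro d hd
  rw [PySem.List.mem_pyRange_one] at hd
  obtain ⟨hd0, hdc⟩ := hd
  unfold pvPiece
  by_cases hg : Int.gcd c d = 1
  · have hnc : PySem.Set.contains (fsMarked c) d = false := by
      rw [← Bool.not_eq_true, pv_marked_iff c d hc hd0 hdc]
      simp [hg]
    rw [hnc]
    by_cases hmid : 0 < d ∧ d < c
    · have h1 : (d == 0 || d == c) = false := by simp; omega
      have h2 : (decide (d > 0) && decide (d < c)) = true := by simp; omega
      simp [h1, h2, hg]
    · have h1 : (d == 0 || d == c) = true := by simp; omega
      have h2 : (decide (d > 0) && decide (d < c)) = false := by simp; omega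
      simp [h1, h2, hg]
  · have hnc : PySem.Set.contains (fsMarked c) d = true :=
      (pv_marked_iff c d hc hd0 hdc).mpr hg
    rw [hnc, if_neg (by simp), if_neg (by simp [hg])]

-- ===== VERDICT (by name: the statement is the Claim_ definition above) =====
theorem farey_sequence_spec : Claim_equal_farey_sequence := by
  intro N _
  unfold Spec_farey_sequence farey_sequence farey_sequence_alt
  have houter : (fun (pairs : List (Int × Int)) c_F =>
      (PySem.List.pyRange 0 (c_F + 1) 1).foldl (fun pairs d =>
        if Int.gcd c_F d == 1 then
          let pairs := pairs ++ [(c_F, d)]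
          if d > 0 && d < c_F then pairs ++ [(c_F, -d)] else pairs
        else pairs) pairs)
      = fun pairs c_F => pairs ++ (PySem.List.pyRange 0 (c_F + 1) 1).flatMap (pvPiece c_F) := by
    funext pairs c_F
    exact pv_inner_eq c_F pairs _
  rw [houter, PySem.List.foldl_append_eq_flatMap]
  congr 1
  apply pv_flatMap_congr
  intro c hc
  rw [PySem.List.mem_pyRange_one] at hc
  exact (pv_row_eq c hc.1).symm
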